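-- pv_equiv track=rewrite | github.com/ewanmer20/DisplacedMolecularDocking | DisplacedGBS_GeneralGraphs/Library_Generate_displaced_samples_alternative_encoding_graphs.py | generate_threefoldstatistics
-- ===== SOURCE A (Python) =====
-- def generate_threefoldstatistics(numodes, truncation):
--     """
--
--     :param numodes: number of modes of the GBS experiment
--     :param truncation: truncation of the Hilbert space for each mode
--     :return:
--     """
--     array_index = []
--     for i in range(numodes):
--         for j in range(numodes):
--             for k in range(numodes):
--                 if i <= j <= k:
--                     array_index.append([i, j, k])
--     return array_index
-- ===== SOURCE B (Python) =====
-- from itertools import combinations_with_replacement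
--
--
-- def generate_threefoldstatistics(numodes, truncation):
--     return [list(t) for t in combinations_with_replacement(range(numodes), 3)]
-- ===== Notes on version B (the rewrite author's own statement) =====
-- stated objective: idiomatic
-- what changed: Replaces the full n^3 cube traversal with an inner i<=j<=k guard by a direct combinatorial generator (itertools.combinations_with_replacement over range(n) taken 3 at a time), which enumerates exactly the non-decreasing triples in the same lexicographic order without visiting rejected triples.
import Mathlib
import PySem

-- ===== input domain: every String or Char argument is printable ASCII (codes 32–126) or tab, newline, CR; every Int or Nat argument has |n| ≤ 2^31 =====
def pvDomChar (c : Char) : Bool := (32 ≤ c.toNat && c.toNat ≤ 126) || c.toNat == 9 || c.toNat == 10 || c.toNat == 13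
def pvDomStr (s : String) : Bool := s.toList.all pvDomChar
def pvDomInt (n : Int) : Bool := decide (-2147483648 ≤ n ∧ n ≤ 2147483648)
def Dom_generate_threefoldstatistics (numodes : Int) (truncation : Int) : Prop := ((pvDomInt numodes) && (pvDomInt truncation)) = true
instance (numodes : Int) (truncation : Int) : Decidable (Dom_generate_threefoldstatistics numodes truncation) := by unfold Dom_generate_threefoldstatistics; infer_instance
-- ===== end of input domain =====

-- B replaces A's cubic scan-and-filter over all (i,j,k) with a direct combinatorial
-- generator (itertools.combinations_with_replacement) producing exactly the
-- non-decreasing triples; objective: idiomatic.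

-- ===== PORT A =====
def generate_threefoldstatistics (numodes : Int) (truncation : Int) : List (List Int) :=
  (PySem.List.pyRange 0 numodes 1).foldl (fun acc i =>
    (PySem.List.pyRange 0 numodes 1).foldl (fun acc j =>
      (PySem.List.pyRange 0 numodes 1).foldl (fun acc k =>
        if i ≤ j ∧ j ≤ k then acc ++ [[i, j, k]] else acc) acc) acc) []

-- ===== PORT B =====
-- combinations_with_replacement(pool, r) for r = 1, 2, 3, in itertools' lexicographic
-- order over the pool's suffixes (faithful recursive transcription of its semantics);
-- tuples are materialised as lists, matching Source B's `list(t)`.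
def pvCwr1 (xs : List Int) : List (List Int) := xs.map (fun x => [x])

def pvCwr2 : List Int → List (List Int)
  | [] => []
  | x :: tl => (pvCwr1 (x :: tl)).map (fun t => x :: t) ++ pvCwr2 tl

def pvCwr3 : List Int → List (List Int)
  | [] => []
  | x :: tl => (pvCwr2 (x :: tl)).map (fun t => x :: t) ++ pvCwr3 tl

def generate_threefoldstatistics_alt (numodes : Int) (truncation : Int) : List (List Int) :=
  pvCwr3 (PySem.List.pyRange 0 numodes 1)

-- ===== PRECONDITION & SPEC =====
def Spec_generate_threefoldstatistics (numodes : Int) (truncation : Int) (out : List (List Int)) : Prop := out = generate_threefoldstatistics_alt numodes truncation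
instance (numodes : Int) (truncation : Int) (out : List (List Int)) : Decidable (Spec_generate_threefoldstatistics numodes truncation out) := by unfold Spec_generate_threefoldstatistics; infer_instance

-- ===== CLAIM (what is proved, stated in full; the proofs are below) =====
def Claim_equal_generate_threefoldstatistics : Prop := ∀ (numodes : Int) (truncation : Int), Dom_generate_threefoldstatistics numodes truncation → Spec_generate_threefoldstatistics numodes truncation (generate_threefoldstatistics numodes truncation)

-- ===== LEMMAS AND PROOFS =====

lemma pv_flatMap_congr_mem {α β : Type} {L : List α} {f g : α → List β}
    (h : ∀ x ∈ L, f x = g x) : L.flatMap f = L.flatMap g := by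
  induction L with
  | nil => rfl
  | cons x tl ih =>
      simp only [List.flatMap_cons]
      rw [h x (by simp), ih (fun y hy => h y (by simp [hy]))]

lemma pv_flatMap_ite {α β : Type} (L : List α) (p : α → Prop) [DecidablePred p]
    (g : α → List β) :
    L.flatMap (fun x => if p x then g x else []) =
      (L.filter (fun x => decide (p x))).flatMap g := by
  induction L with
  | nil => rfl
  | cons x tl ih =>
      by_cases h : p x <;> simp [List.flatMap_cons, h, ih]

lemma pv_filter_le_pyRange (i : Int) :
    ∀ (n : ℕ) (a b : Int), (b - a).toNat ≤ n →
      (PySem.List.pyRange a b 1).filter (fun x => decide (i ≤ x)) =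
        PySem.List.pyRange (max a i) b 1 := by
  intro n
  induction n with
  | zero =>
      intro a b h
      have hb : b ≤ a := by omega
      rw [PySem.List.pyRange_one_eq_nil hb,
          PySem.List.pyRange_one_eq_nil (by omega : b ≤ max a i)]
      rfl
  | succ n ih =>
      intro a b h
      by_cases hab : a < b
      · rw [PySem.List.pyRange_one_cons hab, List.filter_cons]
        by_cases hia : i ≤ a
        · rw [if_pos (by simpa using hia), ih (a + 1) b (by omega),
              max_eq_left (by omega : i ≤ a + 1), max_eq_left hia,
              ← PySem.List.pyRange_one_cons hab]
        · rw [if_neg (by simpa using hia), ih (a + 1) b (by omega),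
              max_eq_right (by omega : a + 1 ≤ i), max_eq_right (by omega : a ≤ i)]
      · rw [PySem.List.pyRange_one_eq_nil (by omega : b ≤ a),
            PySem.List.pyRange_one_eq_nil (by omega : b ≤ max a i)]
        rfl

lemma pv_cwr2_pyRange :
    ∀ (n : ℕ) (a b : Int), (b - a).toNat ≤ n →
      pvCwr2 (PySem.List.pyRange a b 1) =
        (PySem.List.pyRange a b 1).flatMap
          (fun j => (PySem.List.pyRange j b 1).map (fun k => [j, k])) := by
  intro n
  induction n with
  | zero =>
      intro a b h
      rw [PySem.List.pyRange_one_eq_nil (by omega : b ≤ a)]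
      rfl
  | succ n ih =>
      intro a b h
      by_cases hab : a < b
      · rw [PySem.List.pyRange_one_cons hab]
        show (pvCwr1 (a :: PySem.List.pyRange (a+1) b 1)).map (fun t => a :: t) ++
              pvCwr2 (PySem.List.pyRange (a+1) b 1) = _
        rw [ih (a + 1) b (by omega), List.flatMap_cons,
            ← PySem.List.pyRange_one_cons hab]
        simp [pvCwr1, Function.comp]
      · rw [PySem.List.pyRange_one_eq_nil (by omega : b ≤ a)]
        rfl

lemma pv_cwr3_pyRange :
    ∀ (n : ℕ) (a b : Int), (b - a).toNat ≤ n →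
      pvCwr3 (PySem.List.pyRange a b 1) =
        (PySem.List.pyRange a b 1).flatMap
          (fun i => (PySem.List.pyRange i b 1).flatMap
            (fun j => (PySem.List.pyRange j b 1).map (fun k => [i, j, k]))) := by
  intro n
  induction n with
  | zero =>
      intro a b h
      rw [PySem.List.pyRange_one_eq_nil (by omega : b ≤ a)]
      rfl
  | succ n ih =>
      intro a b h
      by_cases hab : a < b
      · rw [PySem.List.pyRange_one_cons hab]
        show (pvCwr2 (a :: PySem.List.pyRange (a+1) b 1)).map (fun t => a :: t) ++
              pvCwr3 (PySem.List.pyRange (a+1) b 1) = _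
        rw [ih (a + 1) b (by omega), List.flatMap_cons,
            ← PySem.List.pyRange_one_cons hab,
            pv_cwr2_pyRange ((b - a).toNat) a b le_rfl]
        simp [List.map_flatMap, Function.comp_def]
      · rw [PySem.List.pyRange_one_eq_nil (by omega : b ≤ a)]
        rfl

-- A's nested loops flattened into filtered flatMaps, then identified with B's generator.
lemma pv_main (b : Int) :
    generate_threefoldstatistics b 0 = pvCwr3 (PySem.List.pyRange 0 b 1) := by
  unfold generate_threefoldstatistics
  simp only [PySem.List.foldl_append_ite, PySem.List.foldl_append_eq_flatMap,
    List.nil_append]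
  rw [pv_cwr3_pyRange b.toNat 0 b (by omega)]
  apply pv_flatMap_congr_mem
  intro i hi
  obtain ⟨hi0, hib⟩ := (PySem.List.mem_pyRange_one).1 hi
  have step1 : ∀ j ∈ PySem.List.pyRange 0 b 1,
      ((PySem.List.pyRange 0 b 1).filter (fun k => decide (i ≤ j ∧ j ≤ k))).map
          (fun k => ([i, j, k] : List Int)) =
        (fun j => if i ≤ j then
            (PySem.List.pyRange j b 1).map (fun k => ([i, j, k] : List Int))
          else []) j := by
    intro j hj
    dsimp only
    obtain ⟨hj0, hjb⟩ := (PySem.List.mem_pyRange_one).1 hj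
    by_cases hij : i ≤ j
    · have hfe : (fun k => decide (i ≤ j ∧ j ≤ k)) = (fun k : Int => decide (j ≤ k)) := by
        funext k; simp [hij]
      rw [if_pos hij, hfe, pv_filter_le_pyRange j b.toNat 0 b (by omega),
          max_eq_right hj0]
    · have hfe : (fun k => decide (i ≤ j ∧ j ≤ k)) = (fun _ : Int => false) := by
        funext k; simp [hij]
      rw [if_neg hij, hfe, List.filter_false, List.map_nil]
  rw [pv_flatMap_congr_mem step1,
      pv_flatMap_ite (PySem.List.pyRange 0 b 1) (fun j => i ≤ j),
      pv_filter_le_pyRange i b.toNat 0 b (by omega), max_eq_right hi0]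

-- ===== VERDICT (by name: the statement is the Claim_ definition above) =====
theorem generate_threefoldstatistics_spec : Claim_equal_generate_threefoldstatistics := by
  intro numodes truncation _
  show _ = _
  unfold generate_threefoldstatistics_alt
  have h := pv_main numodes
  unfold generate_threefoldstatistics at h ⊢
  exact h
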